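-- pv_equiv track=rewrite | github.com/SaptarishiD/Rl4Wordle | my_multi_wordle_env_2.py | _filter_by_yellow_positions
-- ===== SOURCE A (Python) =====
-- def _filter_by_yellow_positions(candidates, yellow_positions):
--     # Keep words where yellow letters are NOT in the positions they were marked yellow
--     filtered = []
--     for word in candidates:
--         valid = True
--         for letter, positions in yellow_positions.items():
--             for pos in positions:
--                 if pos < len(word) and word[pos] == letter:
--                     valid = False
--                     break
--             if not valid:
--                 break
--         if valid:
--             filtered.append(word)
--     return filtered
-- ===== SOURCE B (Python) =====
-- def _filter_by_yellow_positions(candidates, yellow_positions):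
--     # Index all forbidden (position, letter) pairs once, then keep each word
--     # whose own characters avoid them; positions outside the word are ignored.
--     forbidden = {(pos, letter)
--                  for letter, positions in yellow_positions.items()
--                  for pos in positions}
--     return [word for word in candidates
--             if all((i, ch) not in forbidden for i, ch in enumerate(word))]
-- ===== Notes on version B (the rewrite author's own statement) =====
-- stated objective: alternative
-- what changed: B precomputes one set of forbidden (position, letter) pairs and tests each word by enumerating its own characters, instead of A's per-word triple loop over the constraint dict with break flags; Pre_ excludes inputs where a marked position below -len(word) can make A raise IndexError (conservative: an earlier matching position can let A return first, see cites).
-- intended difference: On inputs where some marked position is negative and Python's wraparound makes it hit the matching letter counted from the word's end (and no genuine nonnegative position hits that word), A silently drops the word; B ignores positions outside the word and keeps it, the intended reading since marked positions are board indices. — e.g. on _filter_by_yellow_positions(["ab"], [("a", [-2])]): A returns [], B returns ["ab"]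
-- outside the precondition, e.g. on _filter_by_yellow_positions(['ab'], {'a': [0, -5]}): A returns [], B returns []
import Mathlib
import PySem

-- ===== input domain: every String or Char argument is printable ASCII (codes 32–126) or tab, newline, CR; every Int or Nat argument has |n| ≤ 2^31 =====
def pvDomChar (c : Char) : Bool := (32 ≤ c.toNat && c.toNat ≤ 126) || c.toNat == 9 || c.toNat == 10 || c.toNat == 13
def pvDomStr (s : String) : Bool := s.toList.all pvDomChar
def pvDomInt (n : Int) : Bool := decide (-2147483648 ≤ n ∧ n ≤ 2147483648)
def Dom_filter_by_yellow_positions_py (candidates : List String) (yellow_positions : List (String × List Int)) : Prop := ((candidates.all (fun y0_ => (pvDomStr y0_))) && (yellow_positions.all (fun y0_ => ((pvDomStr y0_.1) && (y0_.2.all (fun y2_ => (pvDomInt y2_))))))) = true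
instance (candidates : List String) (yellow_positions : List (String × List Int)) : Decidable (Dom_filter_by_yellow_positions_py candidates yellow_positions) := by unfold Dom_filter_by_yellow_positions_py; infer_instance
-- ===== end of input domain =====

-- B builds one forbidden-(position,letter) set and scans each word's own characters,
-- ignoring positions outside the word; A additionally honours Python's negative-index
-- wraparound, stated below as the intended difference D_.

-- ===== PORT A =====
-- 'pos < len(word) and word[pos] == letter' (word[pos] is a 1-char string compared to letter)
def pvHitA (word : String) (pos : Int) (letter : String) : Bool :=
  decide (pos < PySem.Str.len word) &&
    ((PySem.Str.pyGet? word pos).any (fun c => String.singleton c == letter))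

def filter_by_yellow_positions_py (candidates : List String) (yellow_positions : List (String × List Int)) : List String :=
  candidates.foldl (fun filtered word =>
    -- 'valid' with the two breaks = no constraint pair matches
    let valid := yellow_positions.all (fun lp => lp.2.all (fun pos => !(pvHitA word pos lp.1)))
    if valid then filtered ++ [word] else filtered) []

-- ===== PORT B =====
def pvForbidden (yellow_positions : List (String × List Int)) : PySem.Set (Int × String) :=
  PySem.Set.ofList (yellow_positions.flatMap (fun lp => lp.2.map (fun pos => (pos, lp.1))))

def filter_by_yellow_positions_py_alt (candidates : List String) (yellow_positions : List (String × List Int)) : List String :=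
  let forbidden := pvForbidden yellow_positions
  candidates.filter (fun word =>
    (PySem.List.enumerate word.toList).all (fun ic =>
      !(PySem.Set.contains forbidden (ic.1, String.singleton ic.2))))

-- ===== PRECONDITION & SPEC =====
-- Pre_ excludes inputs on which A may raise IndexError (a marked position below -len(word)
-- for some candidate word); it is slightly conservative: an earlier matching position can
-- make A drop the word before reaching the bad index (see cites).
def Pre_filter_by_yellow_positions_py (candidates : List String) (yellow_positions : List (String × List Int)) : Prop :=
  ∀ w ∈ candidates, ∀ lp ∈ yellow_positions, ∀ p ∈ lp.2,
    p < PySem.Str.len w → -(PySem.Str.len w) ≤ p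
instance (candidates : List String) (yellow_positions : List (String × List Int)) : Decidable (Pre_filter_by_yellow_positions_py candidates yellow_positions) := by unfold Pre_filter_by_yellow_positions_py; infer_instance

def pvWitness_filter_by_yellow_positions_py : List String × (List (String × List Int)) :=
  (["crane", "stone"], [("a", [1]), ("e", [4])])

-- a marked letter really occurs at an in-range negative position of w (Python wraparound hit)
def pvNegHit (yellow_positions : List (String × List Int)) (w : String) : Prop :=
  ∃ lp ∈ yellow_positions, ∃ p ∈ lp.2, p < 0 ∧ -(w.toList.length : Int) ≤ p ∧
    (w.toList[(p + w.toList.length).toNat]?.map String.singleton) = some lp.1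

-- a marked letter occurs at a genuine (nonnegative, in-range) marked position of w
def pvNonnegHit (yellow_positions : List (String × List Int)) (w : String) : Prop :=
  ∃ lp ∈ yellow_positions, ∃ p ∈ lp.2, 0 ≤ p ∧ p < (w.toList.length : Int) ∧
    (w.toList[p.toNat]?.map String.singleton) = some lp.1

-- On inputs where some marked position is negative and Python's wraparound makes it hit the
-- matching letter counted from the word's end (and no genuine nonnegative position hits that
-- word), A silently drops the word; B ignores positions outside the word and keeps it, the
-- intended reading since marked positions are board indices.
def D_filter_by_yellow_positions_py (candidates : List String) (yellow_positions : List (String × List Int)) : Prop :=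
  ∃ w ∈ candidates, pvNegHit yellow_positions w ∧ ¬ pvNonnegHit yellow_positions w
instance (candidates : List String) (yellow_positions : List (String × List Int)) : Decidable (D_filter_by_yellow_positions_py candidates yellow_positions) := by unfold D_filter_by_yellow_positions_py pvNegHit pvNonnegHit; infer_instance

def Spec_filter_by_yellow_positions_py (candidates : List String) (yellow_positions : List (String × List Int)) (out : List String) : Prop := ¬ D_filter_by_yellow_positions_py candidates yellow_positions → out = filter_by_yellow_positions_py_alt candidates yellow_positions
instance (candidates : List String) (yellow_positions : List (String × List Int)) (out : List String) : Decidable (Spec_filter_by_yellow_positions_py candidates yellow_positions out) := by unfold Spec_filter_by_yellow_positions_py; infer_instance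

def pvDiffWitness_filter_by_yellow_positions_py : List String × (List (String × List Int)) :=
  (["ab"], [("a", [-2])])
def pvDiffWitnessOut_filter_by_yellow_positions_py : (List String) × (List String) :=
  ([], ["ab"])

-- ===== CLAIM (what is proved, stated in full; the proofs are below) =====
def Claim_unchanged_filter_by_yellow_positions_py : Prop := ∀ (candidates : List String) (yellow_positions : List (String × List Int)), Dom_filter_by_yellow_positions_py candidates yellow_positions → Pre_filter_by_yellow_positions_py candidates yellow_positions → Spec_filter_by_yellow_positions_py candidates yellow_positions (filter_by_yellow_positions_py candidates yellow_positions)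
def Claim_changed_filter_by_yellow_positions_py : Prop := Dom_filter_by_yellow_positions_py (pvDiffWitness_filter_by_yellow_positions_py.1) (pvDiffWitness_filter_by_yellow_positions_py.2) ∧ Pre_filter_by_yellow_positions_py (pvDiffWitness_filter_by_yellow_positions_py.1) (pvDiffWitness_filter_by_yellow_positions_py.2) ∧ D_filter_by_yellow_positions_py (pvDiffWitness_filter_by_yellow_positions_py.1) (pvDiffWitness_filter_by_yellow_positions_py.2) ∧ filter_by_yellow_positions_py (pvDiffWitness_filter_by_yellow_positions_py.1) (pvDiffWitness_filter_by_yellow_positions_py.2) = pvDiffWitnessOut_filter_by_yellow_positions_py.1 ∧ filter_by_yellow_positions_py_alt (pvDiffWitness_filter_by_yellow_positions_py.1) (pvDiffWitness_filter_by_yellow_positions_py.2) = pvDiffWitnessOut_filter_by_yellow_positions_py.2 ∧ pvDiffWitnessOut_filter_by_yellow_positions_py.1 ≠ pvDiffWitnessOut_filter_by_yellow_positions_py.2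
def Claim_exact_filter_by_yellow_positions_py : Prop := ∀ (candidates : List String) (yellow_positions : List (String × List Int)), Dom_filter_by_yellow_positions_py candidates yellow_positions → Pre_filter_by_yellow_positions_py candidates yellow_positions → D_filter_by_yellow_positions_py candidates yellow_positions → filter_by_yellow_positions_py candidates yellow_positions ≠ filter_by_yellow_positions_py_alt candidates yellow_positions

-- ===== LEMMAS AND PROOFS =====

theorem pyGet?_neg_add {α : Type} (xs : List α) (i : Int) (h0 : -(xs.length:Int) ≤ i) (h1 : i < 0) :
    PySem.List.pyGet? xs i = xs[(i + xs.length).toNat]? := by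
  have : xs.length - (-i).toNat = (i + xs.length).toNat := by omega
  simp [PySem.List.pyGet?, PySem.List.pyIdx?, if_neg (not_le.mpr h1), if_pos h0, this]

lemma pvHitA_nonneg (w : String) (p : Int) (letter : String)
    (h0 : 0 ≤ p) (hlt : p < (w.toList.length : Int)) :
    pvHitA w p letter = true ↔ (w.toList[p.toNat]?.map String.singleton) = some letter := by
  have hk : p.toNat < w.toList.length := by omega
  have hlt' : p < (w.length : Int) := by rw [← String.length_toList]; exact hlt
  simp [pvHitA, PySem.Str.len_eq, PySem.Str.pyGet?, PySem.Chars.pyGet?_eq_listPyGet?,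
    PySem.List.pyGet?_eq_some_getElem w.toList h0 hlt, List.getElem?_eq_getElem hk, hlt']

lemma pvHitA_neg (w : String) (p : Int) (letter : String)
    (h1 : p < 0) (hge : -(w.toList.length : Int) ≤ p) :
    pvHitA w p letter = true ↔ (w.toList[(p + w.toList.length).toNat]?.map String.singleton) = some letter := by
  have hk : (p + (w.length : Int)).toNat < w.toList.length := by
    rw [← String.length_toList]; omega
  have hlt' : p < (w.length : Int) := by rw [← String.length_toList]; omega
  have hget : PySem.List.pyGet? w.toList p = w.toList[(p + (w.length : Int)).toNat]? := by
    rw [pyGet?_neg_add w.toList p hge h1, String.length_toList]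
  simp [pvHitA, PySem.Str.len_eq, PySem.Str.pyGet?, PySem.Chars.pyGet?_eq_listPyGet?,
    hget, List.getElem?_eq_getElem hk, hlt']

lemma pvHitA_big (w : String) (p : Int) (letter : String)
    (hge : (w.toList.length : Int) ≤ p) : pvHitA w p letter = false := by
  have hge' : ¬ p < (w.length : Int) := by rw [← String.length_toList]; omega
  simp [pvHitA, PySem.Str.len_eq, hge']

-- B's per-word test holds iff no genuine (nonnegative, in-range) marked position hits
lemma pv_Bkeep_iff (yps : List (String × List Int)) (w : String) :
    ((PySem.List.enumerate w.toList).all (fun ic =>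
      !(PySem.Set.contains (pvForbidden yps) (ic.1, String.singleton ic.2)))) = true
    ↔ ¬ pvNonnegHit yps w := by
  simp only [List.all_eq_true, Bool.not_eq_true', pvForbidden, PySem.List.mem_enumerate_iff,
    PySem.Set.contains_iff, PySem.Set.mem_ofList, List.mem_flatMap, List.mem_map,
    Prod.mk.injEq, zero_add, Bool.eq_false_iff, ne_eq, pvNonnegHit]
  constructor
  · rintro h ⟨lp, hlp, p, hp, hp0, hplt, hval⟩
    have hk : p.toNat < w.toList.length := by omega
    rw [List.getElem?_eq_getElem hk] at hval
    refine h ((p.toNat : Int), w.toList[p.toNat]) ⟨p.toNat, hk, rfl⟩ ?_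
    simp only [PySem.Set.contains_iff, PySem.Set.mem_ofList, List.mem_flatMap, List.mem_map]
    exact ⟨lp, hlp, p, by simpa using hp, by simp [Option.some.inj hval]; omega⟩
  · rintro h x ⟨k, hk, rfl⟩ hcon
    simp only [PySem.Set.contains_iff, PySem.Set.mem_ofList, List.mem_flatMap,
      List.mem_map, Prod.mk.injEq] at hcon
    obtain ⟨lp, hlp, p, hp, hpk, hs⟩ := hcon
    refine h ⟨lp, hlp, p, hp, by omega, by omega, ?_⟩
    rw [show p.toNat = k by omega, List.getElem?_eq_getElem hk]
    simp [hs]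

-- A's per-word test holds iff neither a genuine nor a wraparound hit exists (under Pre_ for w)
lemma pv_Akeep_iff (yps : List (String × List Int)) (w : String)
    (hw : ∀ lp ∈ yps, ∀ p ∈ lp.2, p < PySem.Str.len w → -(PySem.Str.len w) ≤ p) :
    (yps.all (fun lp => lp.2.all (fun pos => !(pvHitA w pos lp.1)))) = true
    ↔ ¬ pvNonnegHit yps w ∧ ¬ pvNegHit yps w := by
  simp only [List.all_eq_true, Bool.not_eq_true', Bool.eq_false_iff, ne_eq,
    pvNonnegHit, pvNegHit]
  constructor
  · intro h
    constructor
    · rintro ⟨lp, hlp, p, hp, hp0, hplt, hval⟩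
      exact h lp hlp p hp ((pvHitA_nonneg w p lp.1 hp0 hplt).mpr hval)
    · rintro ⟨lp, hlp, p, hp, hplt0, hpge, hval⟩
      exact h lp hlp p hp ((pvHitA_neg w p lp.1 hplt0 hpge).mpr hval)
  · rintro ⟨hnn, hng⟩ lp hlp p hp hhit
    rcases lt_trichotomy p 0 with hneg | hz | hpos
    · have hpge : -(w.toList.length : Int) ≤ p := by
        have := hw lp hlp p hp
        simp only [PySem.Str.len_eq] at this
        exact this (by omega)
      exact hng ⟨lp, hlp, p, hp, hneg, hpge, (pvHitA_neg w p lp.1 hneg hpge).mp hhit⟩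
    · subst hz
      by_cases hplt : (0:Int) < (w.toList.length : Int)
      · exact hnn ⟨lp, hlp, 0, hp, le_refl 0, hplt, (pvHitA_nonneg w 0 lp.1 (le_refl 0) hplt).mp hhit⟩
      · rw [pvHitA_big w 0 lp.1 (by omega)] at hhit; exact absurd hhit (by simp)
    · by_cases hplt : p < (w.toList.length : Int)
      · exact hnn ⟨lp, hlp, p, hp, by omega, hplt, (pvHitA_nonneg w p lp.1 (by omega) hplt).mp hhit⟩
      · rw [pvHitA_big w p lp.1 (by omega)] at hhit; exact absurd hhit (by simp)

-- ===== VERDICT (by name: the statement is the Claim_ definition above) =====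
theorem filter_by_yellow_positions_py_spec : Claim_unchanged_filter_by_yellow_positions_py := by
  intro candidates yps _hdom hpre hnd
  unfold filter_by_yellow_positions_py filter_by_yellow_positions_py_alt
  rw [PySem.List.foldl_append_if_eq_filter]
  simp only [List.nil_append]
  refine List.filter_congr (fun w hmem => ?_)
  rw [Bool.eq_iff_iff, pv_Akeep_iff yps w (hpre w hmem), pv_Bkeep_iff yps w]
  have hnd' : pvNegHit yps w → pvNonnegHit yps w := by
    intro hng
    by_contra hnn
    exact hnd ⟨w, hmem, hng, hnn⟩
  tauto

theorem filter_by_yellow_positions_py_changed : Claim_changed_filter_by_yellow_positions_py := by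
  unfold Claim_changed_filter_by_yellow_positions_py; decide

theorem filter_by_yellow_positions_py_tight : Claim_exact_filter_by_yellow_positions_py := by
  intro candidates yps _hdom hpre hd heq
  obtain ⟨w, hmem, hng, hnn⟩ := hd
  have hA : w ∉ filter_by_yellow_positions_py candidates yps := by
    unfold filter_by_yellow_positions_py
    rw [PySem.List.foldl_append_if_eq_filter]
    simp only [List.nil_append, List.mem_filter, not_and]
    intro _ hkeep
    exact ((pv_Akeep_iff yps w (hpre w hmem)).mp hkeep).2 hng
  have hB : w ∈ filter_by_yellow_positions_py_alt candidates yps := by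
    unfold filter_by_yellow_positions_py_alt
    simp only [List.mem_filter]
    exact ⟨hmem, (pv_Bkeep_iff yps w).mpr hnn⟩
  exact hA (heq ▸ hB)
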